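-- pv_equiv track=rewrite | github.com/zyy20009619/Evaluator | test.py | invocation
-- ===== SOURCE A (Python) =====
-- def invocation(method_id, explored, invoke_methods, local_contain):
--     if method_id not in invoke_methods:
--         return explored
--
--     next_invocations = list()
--     for called_id in invoke_methods[method_id]:
--         if called_id not in explored and method_id != called_id and called_id in local_contain:
--             next_invocations.append(called_id)
--     if len(next_invocations) > 0:
--         explored[method_id] = next_invocations
--         for next_invocation in next_invocations:
--             invocation(next_invocation, explored, invoke_methods, local_contain)
--     return explored
-- ===== SOURCE B (Python) =====
-- def invocation(method_id, explored, invoke_methods, local_contain):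
--     stack = [method_id]
--     while stack:
--         node = stack.pop()
--         if node not in invoke_methods:
--             continue
--         next_invocations = [c for c in invoke_methods[node]
--                             if c not in explored and c != node and c in local_contain]
--         if next_invocations:
--             explored[node] = next_invocations
--             stack.extend(reversed(next_invocations))
--     return explored
-- ===== Notes on version B (the rewrite author's own statement) =====
-- stated objective: alternative
-- what changed: Replaced the recursive DFS (recursion into each filtered child) by an iterative DFS with an explicit stack seeded with method_id, popping nodes and pushing filtered children in reverse order so the traversal order and the mutated dict are identical.
import Mathlib
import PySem

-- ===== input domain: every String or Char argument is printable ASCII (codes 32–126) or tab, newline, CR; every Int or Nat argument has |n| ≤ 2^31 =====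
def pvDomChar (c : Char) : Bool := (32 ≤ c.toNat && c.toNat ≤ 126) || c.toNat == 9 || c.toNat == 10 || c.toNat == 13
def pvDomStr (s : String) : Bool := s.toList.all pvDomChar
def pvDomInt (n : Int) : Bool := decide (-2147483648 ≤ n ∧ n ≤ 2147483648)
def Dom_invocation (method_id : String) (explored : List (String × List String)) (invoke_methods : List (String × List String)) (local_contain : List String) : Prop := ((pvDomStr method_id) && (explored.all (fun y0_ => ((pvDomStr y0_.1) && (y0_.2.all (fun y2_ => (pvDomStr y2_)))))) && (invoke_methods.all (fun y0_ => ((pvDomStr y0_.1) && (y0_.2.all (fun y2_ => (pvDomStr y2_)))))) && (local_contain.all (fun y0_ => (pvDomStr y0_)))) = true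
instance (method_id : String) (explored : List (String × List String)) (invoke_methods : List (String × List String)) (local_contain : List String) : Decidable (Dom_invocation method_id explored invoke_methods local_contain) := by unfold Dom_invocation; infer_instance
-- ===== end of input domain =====

-- B replaces A's recursive DFS by an iterative DFS with an explicit stack (alternative
-- decomposition, same cost). Both Pythons mutate `explored` in place in the same way;
-- the theorems here are about the returned dict. The Nat fuel in both ports is a totality
-- device only; the initial fuel (one more than the dict's size) always suffices because the
-- chain of nested productive calls consists of distinct keys of invoke_methods.

-- ===== PORT A =====
-- the filter of A's inner loop: called_id not in explored, != node, in local_contain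
def pvFilt (e : PySem.Dict String (List String)) (lc : List String) (u : String) (ch : List String) : List String :=
  ch.filter (fun c => !(e.contains c) && !(u == c) && lc.contains c)

-- recursive DFS, transliterating A (fuel makes the recursion total; never exhausted from the entry point)
def pvGoA (im : PySem.Dict String (List String)) (lc : List String) :
    Nat → String → PySem.Dict String (List String) → PySem.Dict String (List String)
  | 0, _, e => e
  | f+1, u, e =>
    match im.get? u with
    | none => e
    | some ch =>
      let next := pvFilt e lc u ch
      if next.isEmpty then e
      else next.foldl (fun a c => pvGoA im lc f c a) (e.insert u next)

def invocation (method_id : String) (explored : List (String × List String)) (invoke_methods : List (String × List String)) (local_contain : List String) : List (String × List String) :=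
  (pvGoA (PySem.Dict.mk invoke_methods) local_contain (invoke_methods.length + 1) method_id (PySem.Dict.mk explored)).items

-- ===== PORT B =====
-- bound on the length of any pushed child list (for the stack loop's termination measure)
def pvW (im : PySem.Dict String (List String)) : Nat :=
  (im.items.map (fun p => p.2.length)).foldr max 0

theorem pvW_bound (im : PySem.Dict String (List String)) (u : String) (ch : List String)
    (h : im.get? u = some ch) : ch.length ≤ pvW im := by
  have hmem : (u, ch) ∈ im.items := PySem.Dict.mem_items_of_get?_eq_some (d := im) h
  have hl : ch.length ∈ im.items.map (fun p => p.2.length) := List.mem_map_of_mem hmem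
  unfold pvW
  revert hl
  generalize im.items.map (fun p => p.2.length) = l
  induction l with
  | nil => intro hl; cases hl
  | cons a t ih =>
    intro hl
    simp only [List.foldr_cons]
    rcases List.mem_cons.mp hl with h1 | h1
    · rw [h1]; exact Nat.le_max_left _ _
    · exact le_trans (ih h1) (Nat.le_max_right _ _)

def pvMeasure (W : Nat) (st : List (String × Nat)) : Nat :=
  (st.map (fun p => (W + 1) ^ p.2)).sum

-- iterative DFS with an explicit stack, transliterating B's while loop; head of the list = top
def pvGoB (im : PySem.Dict String (List String)) (lc : List String) :
    List (String × Nat) → PySem.Dict String (List String) → PySem.Dict String (List String)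
  | [], e => e
  | (u, f) :: st, e =>
    if f = 0 then pvGoB im lc st e
    else
      match h : im.get? u with
      | none => pvGoB im lc st e
      | some ch =>
        let next := pvFilt e lc u ch
        if next.isEmpty then pvGoB im lc st e
        else pvGoB im lc (next.reverse.foldl (fun s c => (c, f - 1) :: s) st) (e.insert u next)
  termination_by st _ => pvMeasure (pvW im) st
  decreasing_by
  all_goals simp [pvMeasure]
  rename_i hf _
  have hlen : (pvFilt e lc u ch).length ≤ pvW im :=
    le_trans (List.length_filter_le _ _) (pvW_bound im u ch h)
  have h1 : ((pvFilt e lc u ch).map ((fun p => (pvW im + 1) ^ p.2) ∘ fun c => (c, f - 1))).sum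
      = (pvFilt e lc u ch).length * (pvW im + 1) ^ (f - 1) := by
    rw [List.sum_eq_card_nsmul _ ((pvW im + 1) ^ (f - 1))]
    · simp
    · intro x hx
      rcases List.mem_map.mp hx with ⟨c, _, rfl⟩
      rfl
  have hgoal : (pvFilt e lc u ch).length * (pvW im + 1) ^ (f - 1) < (pvW im + 1) ^ f := by
    have hf1 : f = (f - 1) + 1 := by omega
    calc (pvFilt e lc u ch).length * (pvW im + 1) ^ (f - 1)
        ≤ pvW im * (pvW im + 1) ^ (f - 1) := Nat.mul_le_mul_right _ hlen
      _ < (pvW im + 1) * (pvW im + 1) ^ (f - 1) :=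
          Nat.mul_lt_mul_of_pos_right (Nat.lt_succ_self _) (pow_pos (Nat.succ_pos _) _)
      _ = (pvW im + 1) ^ f := by conv_rhs => rw [hf1, pow_succ, mul_comm]
  rw [h1]
  exact hgoal

def invocation_alt (method_id : String) (explored : List (String × List String)) (invoke_methods : List (String × List String)) (local_contain : List String) : List (String × List String) :=
  (pvGoB (PySem.Dict.mk invoke_methods) local_contain [(method_id, invoke_methods.length + 1)] (PySem.Dict.mk explored)).items

-- ===== PRECONDITION & SPEC =====
def Spec_invocation (method_id : String) (explored : List (String × List String)) (invoke_methods : List (String × List String)) (local_contain : List String) (out : List (String × List String)) : Prop := out = invocation_alt method_id explored invoke_methods local_contain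
instance (method_id : String) (explored : List (String × List String)) (invoke_methods : List (String × List String)) (local_contain : List String) (out : List (String × List String)) : Decidable (Spec_invocation method_id explored invoke_methods local_contain out) := by unfold Spec_invocation; infer_instance

-- ===== CLAIM (what is proved, stated in full; the proofs are below) =====
def Claim_equal_invocation : Prop := ∀ (method_id : String) (explored : List (String × List String)) (invoke_methods : List (String × List String)) (local_contain : List String), Dom_invocation method_id explored invoke_methods local_contain → Spec_invocation method_id explored invoke_methods local_contain (invocation method_id explored invoke_methods local_contain)

-- ===== LEMMAS AND PROOFS =====

theorem pvGoB_nil (im : PySem.Dict String (List String)) (lc : List String)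
    (e : PySem.Dict String (List String)) : pvGoB im lc [] e = e := by
  unfold pvGoB
  rfl

theorem pvGoB_zero (im : PySem.Dict String (List String)) (lc : List String)
    (u : String) (st : List (String × Nat)) (e : PySem.Dict String (List String)) :
    pvGoB im lc ((u, 0) :: st) e = pvGoB im lc st e := by
  conv_lhs => unfold pvGoB
  simp

theorem pvGoB_succ_none (im : PySem.Dict String (List String)) (lc : List String)
    (u : String) (f : Nat) (st : List (String × Nat)) (e : PySem.Dict String (List String))
    (h : im.get? u = none) :
    pvGoB im lc ((u, f+1) :: st) e = pvGoB im lc st e := by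
  conv_lhs => unfold pvGoB
  simp only [Nat.succ_ne_zero, if_false]
  split <;> simp_all

theorem pvGoB_succ_some (im : PySem.Dict String (List String)) (lc : List String)
    (u : String) (f : Nat) (st : List (String × Nat)) (e : PySem.Dict String (List String))
    (ch : List String) (h : im.get? u = some ch) :
    pvGoB im lc ((u, f+1) :: st) e =
      if (pvFilt e lc u ch).isEmpty then pvGoB im lc st e
      else pvGoB im lc ((pvFilt e lc u ch).map (fun c => (c, f)) ++ st)
        (e.insert u (pvFilt e lc u ch)) := by
  conv_lhs => unfold pvGoB
  simp only [Nat.succ_ne_zero, if_false, Nat.add_sub_cancel]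
  split
  · simp_all
  · rename_i ch2 heq
    rw [h] at heq
    injection heq with heq2
    subst heq2
    simp

theorem pvGoA_succ (im : PySem.Dict String (List String)) (lc : List String)
    (u : String) (f : Nat) (e : PySem.Dict String (List String)) :
    pvGoA im lc (f+1) u e =
      match im.get? u with
      | none => e
      | some ch =>
        if (pvFilt e lc u ch).isEmpty then e
        else (pvFilt e lc u ch).foldl (fun a c => pvGoA im lc f c a)
          (e.insert u (pvFilt e lc u ch)) := by
  conv_lhs => unfold pvGoA

-- the defunctionalization lemma: running the stack machine with (u, f) on top equals
-- first running the recursive DFS on u with fuel f, then the rest of the stack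
theorem pvGoB_eq_goA (im : PySem.Dict String (List String)) (lc : List String) :
    ∀ (f : Nat) (u : String) (st : List (String × Nat)) (e : PySem.Dict String (List String)),
      pvGoB im lc ((u, f) :: st) e = pvGoB im lc st (pvGoA im lc f u e) := by
  intro f
  induction f with
  | zero =>
    intro u st e
    rw [pvGoB_zero]
    rfl
  | succ f ih =>
    intro u st e
    have aux : ∀ (l : List String) (st : List (String × Nat)) (e : PySem.Dict String (List String)),
        pvGoB im lc (l.map (fun c => (c, f)) ++ st) e
          = pvGoB im lc st (l.foldl (fun a c => pvGoA im lc f c a) e) := by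
      intro l
      induction l with
      | nil => intro st e; simp
      | cons c t iht =>
        intro st e
        simp only [List.map_cons, List.cons_append, List.foldl_cons]
        rw [ih c (t.map (fun c => (c, f)) ++ st) e, iht]
    cases h : im.get? u with
    | none =>
      rw [pvGoB_succ_none im lc u f st e h, pvGoA_succ]
      simp [h]
    | some ch =>
      rw [pvGoB_succ_some im lc u f st e ch h, pvGoA_succ]
      simp only [h]
      split
      · rfl
      · rw [aux]

-- ===== VERDICT (by name: the statement is the Claim_ definition above) =====
theorem invocation_spec : Claim_equal_invocation := by
  intro method_id explored invoke_methods local_contain _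
  unfold Spec_invocation invocation invocation_alt
  rw [pvGoB_eq_goA, pvGoB_nil]
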